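-- pv_equiv track=rewrite | github.com/manwar/perlweeklychallenge-club | challenge-344/lubos-kolouch/python/ch-1.py | array_form_compute
-- ===== SOURCE A (Python) =====
-- def array_form_compute(ints: list[int], x: int) -> list[int]:
--     """
--     Add the integer ``x`` to the number represented by ``ints`` in array form.
--
--     Args:
--         ints (list[int]): Digits of the number ordered from most to least significant.
--         x (int): The value to add.
--
--     Returns:
--         list[int]: Digits of the resulting sum in array form.
--     """
--     result: list[int] = []
--     carry = x
--     index = len(ints) - 1
--
--     while index >= 0 or carry > 0:
--         if index >= 0:
--             carry += ints[index]
--             index -= 1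
--         result.append(carry % 10)
--         carry //= 10
--
--     if not result:
--         return [0]
--
--     result.reverse()
--     return result
-- ===== SOURCE B (Python) =====
-- def array_form_compute(ints: list[int], x: int) -> list[int]:
--     """Compute the whole sum as one integer, then peel its digits off with
--     divmod, emitting at least len(ints) digits (and at least one)."""
--     total = 0
--     for d in ints:
--         total = total * 10 + d
--     total += x
--     out: list[int] = []
--     k = max(len(ints), 1)
--     while k > 0 or total > 0:
--         out.append(total % 10)
--         total //= 10
--         k -= 1
--     out.reverse()
--     return out
-- ===== Notes on version B (the rewrite author's own statement) =====
-- stated objective: alternative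
-- what changed: A propagates a carry digit-by-digit through the array while building and reversing a result list; B instead folds the whole array into a single integer (Horner) plus x, then peels the digits of that one total off with divmod, emitting at least len(ints) digits to preserve leading zeros; it trades A's small-int carry arithmetic for big-integer arithmetic, so it is not faster on huge arrays.
-- outside the precondition, e.g. on array_form_compute([], -7): A returns [0], B returns [3]
import Mathlib
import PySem

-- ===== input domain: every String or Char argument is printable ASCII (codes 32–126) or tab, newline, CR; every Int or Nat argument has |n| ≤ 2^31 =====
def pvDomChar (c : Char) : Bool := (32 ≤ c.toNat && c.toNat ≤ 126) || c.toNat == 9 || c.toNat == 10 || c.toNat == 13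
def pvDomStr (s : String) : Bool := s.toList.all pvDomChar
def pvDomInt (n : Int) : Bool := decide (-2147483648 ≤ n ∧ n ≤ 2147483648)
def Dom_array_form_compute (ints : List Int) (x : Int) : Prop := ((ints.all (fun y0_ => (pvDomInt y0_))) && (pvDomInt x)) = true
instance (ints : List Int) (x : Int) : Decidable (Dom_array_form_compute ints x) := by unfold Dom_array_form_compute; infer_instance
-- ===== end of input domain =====

-- B replaces A's per-element carry-propagation loop by computing the whole sum as one
-- integer and peeling its digits off with divmod (objective: simpler).

-- ===== PORT A =====
-- A's while-loop, second phase: index is exhausted, keep emitting digits while carry > 0.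
def afTrail (carry : Int) (result : List Int) : List Int :=
  if h : 0 < carry then
    afTrail (PySem.Int.floordiv carry 10) (result ++ [PySem.Int.mod carry 10])
  else result
termination_by carry.toNat
decreasing_by
  have : PySem.Int.floordiv carry 10 = carry / 10 :=
    PySem.Int.floordiv_eq_ediv_of_pos (by norm_num)
  rw [this]; omega

-- A's while-loop, first phase: index walks from len-1 down to 0, i.e. over ints.reverse.
def afMain : List Int → Int → List Int → List Int
  | [], carry, result => afTrail carry result
  | d :: rest, carry, result =>
      afMain rest (PySem.Int.floordiv (carry + d) 10)
        (result ++ [PySem.Int.mod (carry + d) 10])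

def array_form_compute (ints : List Int) (x : Int) : List Int :=
  let result := afMain ints.reverse x []
  if result = [] then [0] else result.reverse

-- ===== PORT B =====
-- B's while-loop: emit total % 10 while k > 0 or total > 0.
def bLoop (total : Int) (k : Int) (out : List Int) : List Int :=
  if h : 0 < k ∨ 0 < total then
    bLoop (PySem.Int.floordiv total 10) (k - 1) (out ++ [PySem.Int.mod total 10])
  else out
termination_by total.toNat + k.toNat
decreasing_by
  have : PySem.Int.floordiv total 10 = total / 10 :=
    PySem.Int.floordiv_eq_ediv_of_pos (by norm_num)
  rw [this]
  rcases h with hk | ht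
  · have : total / 10 ≤ total.toNat := by omega
    omega
  · omega

def array_form_compute_alt (ints : List Int) (x : Int) : List Int :=
  let total := ints.foldl (fun acc d => acc * 10 + d) 0 + x
  (bLoop total (max (ints.length : Int) 1) []).reverse

-- ===== PRECONDITION & SPEC =====
-- Pre_ excludes only empty ints with negative x: no number is represented there, and
-- A's [0] versus B's single residue digit are both accidental corner values.
def Pre_array_form_compute (ints : List Int) (x : Int) : Prop := ints ≠ [] ∨ 0 ≤ x
instance (ints : List Int) (x : Int) : Decidable (Pre_array_form_compute ints x) := by
  unfold Pre_array_form_compute; infer_instance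

def pvWitness_array_form_compute : List Int × Int := ([1, 2, 3], 14)

def Spec_array_form_compute (ints : List Int) (x : Int) (out : List Int) : Prop := out = array_form_compute_alt ints x
instance (ints : List Int) (x : Int) (out : List Int) : Decidable (Spec_array_form_compute ints x out) := by unfold Spec_array_form_compute; infer_instance

-- ===== CLAIM (what is proved, stated in full; the proofs are below) =====
def Claim_equal_array_form_compute : Prop := ∀ (ints : List Int) (x : Int), Dom_array_form_compute ints x → Pre_array_form_compute ints x → Spec_array_form_compute ints x (array_form_compute ints x)

-- ===== LEMMAS AND PROOFS =====

-- value represented with the LEAST significant digit first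
def valLSB : List Int → Int
  | [] => 0
  | d :: rest => d + 10 * valLSB rest

lemma valLSB_append (t : List Int) (d : Int) :
    valLSB (t ++ [d]) = valLSB t + d * 10 ^ t.length := by
  induction t with
  | nil => simp [valLSB]
  | cons e t ih => simp [valLSB, ih]; ring

lemma foldl_horner (l : List Int) (a : Int) :
    l.foldl (fun acc d => acc * 10 + d) a = valLSB l.reverse + a * 10 ^ l.length := by
  induction l generalizing a with
  | nil => simp [valLSB]
  | cons d rest ih =>
      simp only [List.foldl_cons, List.reverse_cons, ih, valLSB_append,
        List.length_reverse, List.length_cons]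
      ring

lemma afTrail_append (carry : Int) (out : List Int) :
    ∃ s, afTrail carry out = out ++ s := by
  by_cases h : 0 < carry
  · rw [afTrail, dif_pos h]
    obtain ⟨s, hs⟩ := afTrail_append (PySem.Int.floordiv carry 10)
      (out ++ [PySem.Int.mod carry 10])
    exact ⟨[PySem.Int.mod carry 10] ++ s, by rw [hs, List.append_assoc]⟩
  · exact ⟨[], by rw [afTrail, dif_neg h, List.append_nil]⟩
termination_by carry.toNat
decreasing_by
  have : PySem.Int.floordiv carry 10 = carry / 10 :=
    PySem.Int.floordiv_eq_ediv_of_pos (by norm_num)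
  rw [this]; omega

lemma afTrail_eq_bLoop (carry : Int) (k : Int) (out : List Int) (hk : k ≤ 0) :
    afTrail carry out = bLoop carry k out := by
  by_cases h : 0 < carry
  · rw [afTrail, dif_pos h, bLoop, dif_pos (Or.inr h)]
    exact afTrail_eq_bLoop _ _ _ (by omega)
  · rw [afTrail, dif_neg h, bLoop, dif_neg (by omega)]
termination_by carry.toNat
decreasing_by
  have : PySem.Int.floordiv carry 10 = carry / 10 :=
    PySem.Int.floordiv_eq_ediv_of_pos (by norm_num)
  rw [this]; omega

lemma floordiv_shift (c v : Int) :
    PySem.Int.floordiv (c + 10 * v) 10 = PySem.Int.floordiv c 10 + v := by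
  rw [PySem.Int.floordiv_eq_ediv_of_pos (by norm_num : (0:Int) < 10),
      PySem.Int.floordiv_eq_ediv_of_pos (by norm_num : (0:Int) < 10)]
  omega

lemma mod_shift (c v : Int) :
    PySem.Int.mod (c + 10 * v) 10 = PySem.Int.mod c 10 := by
  rw [PySem.Int.mod_eq_emod_of_pos (by norm_num : (0:Int) < 10),
      PySem.Int.mod_eq_emod_of_pos (by norm_num : (0:Int) < 10)]
  omega

-- the list phase of A equals B's loop with k = length, for nonempty lists
lemma afMain_eq_bLoop (l : List Int) (carry : Int) (out : List Int) (hl : l ≠ []) :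
    afMain l carry out = bLoop (carry + valLSB l) (l.length : Int) out := by
  induction l generalizing carry out with
  | nil => exact absurd rfl hl
  | cons d rest ih =>
      rw [afMain]
      rw [bLoop, dif_pos (Or.inl (show (0:Int) < ((d :: rest).length : Int) by
        rw [List.length_cons]; push_cast; omega))]
      have hmod : PySem.Int.mod (carry + valLSB (d :: rest)) 10
          = PySem.Int.mod (carry + d) 10 := by
        simp only [valLSB, ← add_assoc]; exact mod_shift _ _
      have hdiv : PySem.Int.floordiv (carry + valLSB (d :: rest)) 10
          = PySem.Int.floordiv (carry + d) 10 + valLSB rest := by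
        simp only [valLSB, ← add_assoc]; exact floordiv_shift _ _
      rw [hmod, hdiv]
      rcases rest with _ | ⟨e, t⟩
      · simp only [afMain, valLSB, add_zero]
        exact afTrail_eq_bLoop _ _ _ (by norm_num)
      · rw [ih _ _ (by simp)]
        congr 1
        simp only [List.length_cons]
        push_cast
        ring

lemma afMain_out_ne (l : List Int) (carry : Int) (out : List Int) (hout : out ≠ []) :
    afMain l carry out ≠ [] := by
  induction l generalizing carry out with
  | nil =>
      obtain ⟨s, hs⟩ := afTrail_append carry out
      rw [afMain, hs]
      simp [hout]
  | cons d rest ih =>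
      rw [afMain]
      exact ih _ _ (by simp)

lemma afMain_ne_nil (l : List Int) (carry : Int) (hl : l ≠ []) :
    afMain l carry [] ≠ [] := by
  rcases l with _ | ⟨a, t⟩
  · exact absurd rfl hl
  · rw [afMain]
    exact afMain_out_ne _ _ _ (by simp)

lemma afTrail_pos_eq (x : Int) (hx : 0 < x) :
    afTrail x [] = bLoop x 1 [] := by
  rw [afTrail, dif_pos hx, bLoop, dif_pos (Or.inl one_pos)]
  exact afTrail_eq_bLoop _ _ _ (by omega)

-- ===== VERDICT (by name: the statement is the Claim_ definition above) =====
theorem array_form_compute_spec : Claim_equal_array_form_compute := by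
  intro ints x _ hpre
  unfold Spec_array_form_compute
  rcases ints with _ | ⟨d, rest⟩
  · rcases hpre with h | hx
    · exact absurd rfl h
    · rcases lt_or_eq_of_le hx with hpos | heq
      · unfold array_form_compute array_form_compute_alt
        simp only [List.reverse_nil, List.foldl_nil, List.length_nil, Nat.cast_zero,
          zero_add, afMain]
        have hne : afTrail x [] ≠ [] := by
          rw [afTrail, dif_pos hpos]
          obtain ⟨s, hs⟩ := afTrail_append (PySem.Int.floordiv x 10)
            ([] ++ [PySem.Int.mod x 10])
          rw [hs]; simp
        rw [if_neg hne, show (max (0:Int) 1) = 1 by norm_num, afTrail_pos_eq x hpos]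
      · cases heq
        unfold array_form_compute array_form_compute_alt
        simp only [List.reverse_nil, List.foldl_nil, List.length_nil, Nat.cast_zero,
          zero_add, afMain]
        rw [afTrail, dif_neg (by norm_num), if_pos rfl,
          show (max (0:Int) 1) = 1 by norm_num,
          bLoop, dif_pos (Or.inl one_pos), bLoop, dif_neg (by
            rw [PySem.Int.floordiv_eq_ediv_of_pos (by norm_num : (0:Int) < 10)]
            norm_num),
          PySem.Int.mod_eq_emod_of_pos (by norm_num : (0:Int) < 10)]
        norm_num
  · have hne : (d :: rest).reverse ≠ [] := by simp
    unfold array_form_compute array_form_compute_alt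
    rw [if_neg (afMain_ne_nil _ x hne), afMain_eq_bLoop _ _ _ hne]
    have ht : (d :: rest).foldl (fun acc d => acc * 10 + d) 0 + x
        = x + valLSB (d :: rest).reverse := by
      rw [foldl_horner]; ring
    have hk : (max ((d :: rest).length : Int) 1) = ((d :: rest).reverse.length : Int) := by
      simp only [List.length_reverse, List.length_cons]; push_cast; omega
    rw [ht, hk]
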